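-- pv_equiv track=rewrite | github.com/YohannesDereje/The-Conversion-Engine | agent/agent_core.py | _split_subject_body
-- ===== SOURCE A (Python) =====
-- def _split_subject_body(email_text: str) -> tuple[str, str]:
--     """Split 'subject\\n\\nbody' email text into (subject, body) at the first blank line."""
--     lines = email_text.splitlines()
--     if not lines:
--         return "", ""
--     subject = lines[0].strip()
--     body_start = 1
--     while body_start < len(lines) and not lines[body_start].strip():
--         body_start += 1
--     body = "\n".join(lines[body_start:]).strip()
--     return subject, body
-- ===== SOURCE B (Python) =====
-- def _split_subject_body(email_text: str) -> tuple[str, str]: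
--     """Split 'subject\n\nbody' email text into (subject, body) at the first line break.
--
--     Single character-level pass: find the first line terminator, strip the prefix
--     for the subject, then normalize the remainder's line endings to '\n' in one
--     scan and strip it for the body (no splitlines/join, no blank-line skipping:
--     the final strip discards whatever leading blank lines contribute)."""
--     n = len(email_text)
--     if n == 0:
--         return "", ""
--     i = 0
--     while i < n and email_text[i] != "\n" and email_text[i] != "\r":
--         i += 1
--     subject = email_text[:i].strip()
--     if i < n:
--         i += 2 if email_text.startswith("\r\n", i) else 1
--     out = []
--     while i < n:
--         c = email_text[i]
--         if c == "\r":
--             out.append("\n")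
--             if email_text.startswith("\r\n", i):
--                 i += 1
--         else:
--             out.append(c)
--         i += 1
--     return subject, "".join(out).strip()
-- ===== Notes on version B (the rewrite author's own statement) =====
-- stated objective: alternative
-- what changed: Replaces splitlines + blank-line-skipping while loop + join with a single character-level scan: find the first line terminator for the subject, then normalize the remainder's \r\n/\r endings to \n in one pass and strip it for the body; the blank-line skip is unnecessary because the final strip discards it.
import Mathlib
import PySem

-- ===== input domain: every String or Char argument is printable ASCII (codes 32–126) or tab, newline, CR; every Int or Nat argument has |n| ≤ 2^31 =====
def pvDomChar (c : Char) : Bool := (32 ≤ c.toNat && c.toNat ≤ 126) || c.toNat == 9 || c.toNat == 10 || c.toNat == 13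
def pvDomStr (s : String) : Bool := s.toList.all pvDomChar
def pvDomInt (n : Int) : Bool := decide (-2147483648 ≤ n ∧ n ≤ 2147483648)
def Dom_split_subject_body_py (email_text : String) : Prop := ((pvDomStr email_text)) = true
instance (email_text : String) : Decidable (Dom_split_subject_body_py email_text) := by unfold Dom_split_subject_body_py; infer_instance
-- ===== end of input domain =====

-- B replaces A's splitlines + blank-line-skipping loop + join with one character-level
-- scan (find first terminator, normalize the rest's line endings, strip) — objective: alternative.

-- ===== PORT A =====
-- the `while body_start < len(lines) and not lines[body_start].strip(): body_start += 1`
-- loop, as structural recursion on the lines after the first (lines[body_start:] is its result)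
def pvSkipBlank (ls : List String) : List String :=
  match ls with
  | [] => []
  | l :: rest => if PySem.Str.strip l == "" then pvSkipBlank rest else l :: rest

def split_subject_body_py (email_text : String) : String × String :=
  match PySem.Str.splitlines email_text with
  | [] => ("", "")
  | first :: rest =>
    let subject := PySem.Str.strip first
    let body := PySem.Str.strip (PySem.Str.join "\n" (pvSkipBlank rest))
    (subject, body)

-- ===== PORT B =====
-- the first while loop of Source B: the characters before the first line terminator,
-- and the remainder from that terminator on (email_text[:i], email_text[i:])
def pvScan (cs : List Char) : List Char × List Char :=
  match cs with
  | [] => ([], [])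
  | c :: rest =>
    if c == '\n' || c == '\r' then ([], c :: rest)
    else
      let p := pvScan rest
      (c :: p.1, p.2)

-- the `i += 2 if email_text.startswith("\r\n", i) else 1` step (rest starts at the terminator)
def pvConsume (cs : List Char) : List Char :=
  match cs with
  | [] => []
  | '\r' :: '\n' :: rest => rest
  | _ :: rest => rest

-- the second while loop of Source B building `out`: '\r\n' and '\r' become '\n'
def pvNorm (cs : List Char) : List Char :=
  match cs with
  | [] => []
  | '\r' :: '\n' :: rest => '\n' :: pvNorm rest
  | '\r' :: rest => '\n' :: pvNorm rest
  | c :: rest => c :: pvNorm rest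

def split_subject_body_py_alt (email_text : String) : String × String :=
  match email_text.toList with
  | [] => ("", "")
  | c :: rest =>
    let p := pvScan (c :: rest)
    (String.ofList (PySem.Chars.strip p.1),
     String.ofList (PySem.Chars.strip (pvNorm (pvConsume p.2))))

-- ===== PRECONDITION & SPEC =====
def Spec_split_subject_body_py (email_text : String) (out : String × String) : Prop := out = split_subject_body_py_alt email_text
instance (email_text : String) (out : String × String) : Decidable (Spec_split_subject_body_py email_text out) := by unfold Spec_split_subject_body_py; infer_instance

-- ===== CLAIM (what is proved, stated in full; the proofs are below) =====
def Claim_equal_split_subject_body_py : Prop := ∀ (email_text : String), Dom_split_subject_body_py email_text → Spec_split_subject_body_py email_text (split_subject_body_py email_text)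

-- ===== LEMMAS AND PROOFS =====

-- proof-level reference splitter: splitlines with an explicit current-line accumulator
def pvSplit2 (cs : List Char) (cur : List Char) : List (List Char) :=
  match cs with
  | [] => if cur = [] then [] else [cur.reverse]
  | '\r' :: '\n' :: rest => cur.reverse :: pvSplit2 rest []
  | c :: rest =>
    if c == '\n' || c == '\r' then cur.reverse :: pvSplit2 rest []
    else pvSplit2 rest (c :: cur)

-- does the string end in a line terminator?
def pvEndsTerm (cs : List Char) : Bool :=
  match cs with
  | [] => false
  | [c] => c == '\n' || c == '\r'
  | _ :: rest => pvEndsTerm rest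

-- step (equation) lemmas for the overlapping-pattern matches
lemma pvSplit2_nil (cur : List Char) :
    pvSplit2 [] cur = if cur = [] then [] else [cur.reverse] := rfl

lemma pvSplit2_rn (rest cur : List Char) :
    pvSplit2 ('\r' :: '\n' :: rest) cur = cur.reverse :: pvSplit2 rest [] := rfl

lemma pvSplit2_step (c : Char) (rest cur : List Char)
    (h : ∀ r1, c = '\r' → rest = '\n' :: r1 → False) :
    pvSplit2 (c :: rest) cur
      = if c == '\n' || c == '\r' then cur.reverse :: pvSplit2 rest []
        else pvSplit2 rest (c :: cur) := by
  rw [pvSplit2.eq_def]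
  split
  · simp_all
  · rename_i r1 heq
    injection heq with e1 e2
    exact (h r1 e1 e2).elim
  · rename_i d ds hnd heq
    injection heq with e1 e2
    subst e1; subst e2
    rfl

lemma pvNorm_rn (rest : List Char) :
    pvNorm ('\r' :: '\n' :: rest) = '\n' :: pvNorm rest := rfl

lemma pvNorm_step (c : Char) (rest : List Char)
    (h : ∀ r1, c = '\r' → rest = '\n' :: r1 → False) :
    pvNorm (c :: rest) = (if c == '\r' then '\n' else c) :: pvNorm rest := by
  rw [pvNorm.eq_def]
  split
  · simp_all
  · rename_i r1 heq
    injection heq with e1 e2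
    exact (h r1 e1 e2).elim
  · rename_i rest' hh heq
    injection heq with e1 e2
    subst e1; subst e2
    simp
  · rename_i d ds h1 h2 heq
    injection heq with e1 e2
    subst e1; subst e2
    have hcr : (c == '\r') = false := by simpa using h2
    simp [hcr]

lemma pvConsume_step (c : Char) (rest : List Char)
    (h : ∀ r1, c = '\r' → rest = '\n' :: r1 → False) :
    pvConsume (c :: rest) = rest := by
  rw [pvConsume.eq_def]
  split
  · simp_all
  · rename_i r1 heq
    injection heq with e1 e2
    exact (h r1 e1 e2).elim
  · rename_i d ds hnd heq
    injection heq with e1 e2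
    rw [e2]

lemma pvEndsTerm_cons (c d : Char) (rest : List Char) :
    pvEndsTerm (c :: d :: rest) = pvEndsTerm (d :: rest) := rfl

lemma go_nil (isB : Char → Bool) (cur : List Char) (acc : List (List Char)) :
    PySem.Chars.splitlines.go isB [] cur acc
      = if cur.isEmpty then acc.reverse else (cur.reverse :: acc).reverse := rfl

lemma go_rn (isB : Char → Bool) (rest cur : List Char) (acc : List (List Char)) :
    PySem.Chars.splitlines.go isB ('\r' :: '\n' :: rest) cur acc
      = PySem.Chars.splitlines.go isB rest [] (cur.reverse :: acc) := rfl

lemma go_step (isB : Char → Bool) (c : Char) (rest cur : List Char) (acc : List (List Char))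
    (h : ∀ r1, c = '\r' → rest = '\n' :: r1 → False) :
    PySem.Chars.splitlines.go isB (c :: rest) cur acc
      = if isB c then PySem.Chars.splitlines.go isB rest [] (cur.reverse :: acc)
        else PySem.Chars.splitlines.go isB rest (c :: cur) acc := by
  rw [PySem.Chars.splitlines.go.eq_def]
  split
  · simp_all
  · rename_i r1 heq
    injection heq with e1 e2
    exact (h r1 e1 e2).elim
  · rename_i d ds hnd heq
    injection heq with e1 e2
    subst e1; subst e2
    rfl

-- a line whose strip is empty consists of whitespace only
lemma strip_eq_nil_all_space (l : List Char) (h : PySem.Chars.strip l = []) :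
    ∀ c ∈ l, PySem.Chars.isspace c = true := by
  have hys : List.dropWhile PySem.Chars.isspace l = [] := by
    set ys := List.dropWhile PySem.Chars.isspace l with hys
    cases hcase : ys with
    | nil => rfl
    | cons y ytl =>
      exfalso
      have hyhead : PySem.Chars.isspace y = false := by
        have := List.head_dropWhile_not (p := PySem.Chars.isspace) (l := l)
        rw [← hys, hcase] at this
        simpa using this (by simp)
      have : (List.dropWhile PySem.Chars.isspace ys.reverse).reverse = [] := h
      have hall : ∀ c ∈ ys.reverse, PySem.Chars.isspace c = true := by
        rw [← List.dropWhile_eq_nil_iff]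
        simpa [List.reverse_eq_nil_iff] using this
      have := hall y (by simp [hcase])
      simp [hyhead] at this
  exact List.dropWhile_eq_nil_iff.mp hys

-- stripping ignores an all-whitespace prefix
lemma strip_space_prefix (ws cs : List Char) (h : ∀ c ∈ ws, PySem.Chars.isspace c = true) :
    PySem.Chars.strip (ws ++ cs) = PySem.Chars.strip cs := by
  unfold PySem.Chars.strip PySem.Chars.lstrip
  rw [List.dropWhile_append]
  simp [List.dropWhile_eq_nil_iff.mpr h]

-- the rstrip side: an all-whitespace suffix is dropped
lemma rstrip_space_suffix (cs ws : List Char) (h : ∀ c ∈ ws, PySem.Chars.isspace c = true) :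
    PySem.Chars.rstrip (cs ++ ws) = PySem.Chars.rstrip cs := by
  unfold PySem.Chars.rstrip
  rw [List.reverse_append, List.dropWhile_append]
  have : List.dropWhile PySem.Chars.isspace ws.reverse = [] :=
    List.dropWhile_eq_nil_iff.mpr (fun c hc => h c (by simpa using hc))
  simp [this]

-- stripping ignores an all-whitespace suffix
lemma strip_space_suffix (cs ws : List Char) (h : ∀ c ∈ ws, PySem.Chars.isspace c = true) :
    PySem.Chars.strip (cs ++ ws) = PySem.Chars.strip cs := by
  unfold PySem.Chars.strip PySem.Chars.lstrip
  rw [List.dropWhile_append]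
  split_ifs with hh
  · have hcs : List.dropWhile PySem.Chars.isspace cs = [] := by
      simpa [List.isEmpty_iff] using hh
    have hws : List.dropWhile PySem.Chars.isspace ws = [] :=
      List.dropWhile_eq_nil_iff.mpr h
    rw [hcs, hws]
  · exact rstrip_space_suffix _ _ h

-- A's skipping of blank lines before the join does not change the stripped result
lemma strip_join_skip (ls : List String) :
    PySem.Str.strip (PySem.Str.join "\n" (pvSkipBlank ls))
      = PySem.Str.strip (PySem.Str.join "\n" ls) := by
  induction ls with
  | nil => rfl
  | cons l rest ih =>
    by_cases hb : PySem.Str.strip l == ""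
    · have hl : PySem.Chars.strip l.toList = [] := by
        have : PySem.Str.strip l = "" := eq_of_beq hb
        have := congrArg String.toList this
        simpa [PySem.Str.toList_strip] using this
      have hws := strip_eq_nil_all_space l.toList hl
      rw [pvSkipBlank, if_pos hb, ih]
      apply String.toList_inj.mp
      cases rest with
      | nil =>
        simp [PySem.Str.toList_strip, PySem.Str.toList_join, PySem.Chars.join,
              List.intercalate, PySem.Chars.strip, PySem.Chars.lstrip, PySem.Chars.rstrip]
        intro x hx
        exact hws x (List.Sublist.mem hx (List.dropWhile_sublist _))
      | cons r rs =>
        simp only [PySem.Str.toList_strip, PySem.Str.toList_join, List.map]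
        rw [PySem.Chars.join_cons_cons]
        rw [show l.toList ++ "\n".toList ++
              PySem.Chars.join "\n".toList (r.toList :: List.map String.toList rs)
            = (l.toList ++ "\n".toList) ++
              PySem.Chars.join "\n".toList (r.toList :: List.map String.toList rs) by
          simp]
        rw [strip_space_prefix (l.toList ++ "\n".toList) _ (by
          intro c hc
          rcases List.mem_append.mp hc with h1 | h2
          · exact hws c h1
          · have hc2 : c = '\n' := by simpa using h2
            subst hc2; decide
          )]
    · rw [pvSkipBlank, if_neg hb]

-- splitlines' tail-recursive worker equals the reference splitter, for strings whose
-- line breaks are only '\n' / '\r' (the domain's)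
lemma go_eq_split2 (isB : Char → Bool) (cs cur : List Char)
    (h : ∀ c ∈ cs, isB c = (c == '\n' || c == '\r')) :
    ∀ acc, PySem.Chars.splitlines.go isB cs cur acc = acc.reverse ++ pvSplit2 cs cur := by
  induction cs, cur using pvSplit2.induct with
  | case1 =>
    intro acc
    rw [go_nil, pvSplit2_nil]
    simp
  | case2 cur hcur =>
    intro acc
    rw [go_nil, pvSplit2_nil, if_neg hcur]
    simp [List.isEmpty_iff, hcur]
  | case3 cur rest ih =>
    intro acc
    rw [go_rn, pvSplit2_rn, ih (fun c hc => h c (by simp [hc]))]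
    simp
  | case4 cur c rest hne hb ih =>
    intro acc
    rw [go_step isB c rest cur acc hne, pvSplit2_step c rest cur hne,
        h c (by simp), if_pos hb, if_pos hb,
        ih (fun x hx => h x (by simp [hx]))]
    simp
  | case5 cur c rest hne hb ih =>
    intro acc
    rw [go_step isB c rest cur acc hne, pvSplit2_step c rest cur hne,
        h c (by simp), if_neg hb, if_neg hb,
        ih (fun x hx => h x (by simp [hx]))]

lemma splitlines_eq_split2 (cs : List Char) (h : ∀ c ∈ cs, pvDomChar c = true) :
    PySem.Chars.splitlines cs = pvSplit2 cs [] := by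
  unfold PySem.Chars.splitlines
  rw [go_eq_split2 _ cs [] (fun c hc => by
    have hc' := h c hc
    simp only [pvDomChar] at hc'
    by_cases h10 : c.toNat = 10
    · have : c = '\n' := by rw [← Char.ofNat_toNat c, h10]
      subst this; simp
    · by_cases h13 : c.toNat = 13
      · have : c = '\r' := by rw [← Char.ofNat_toNat c, h13]
        subst this; simp
      · have hdd : ((32 ≤ c.toNat ∧ c.toNat ≤ 126 ∨ c.toNat = 9) ∨ c.toNat = 10) ∨ c.toNat = 13 := by
          simpa using hc'
        have hn : ¬ c = '\n' := fun e => h10 (by subst e; rfl)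
        have hr : ¬ c = '\r' := fun e => h13 (by subst e; rfl)
        have hrhs : (c == '\n' || c == '\r') = false := by simp [hn, hr]
        rw [hrhs]
        simp only [Bool.or_eq_false_iff, decide_eq_false_iff_not]
        omega)]
  simp

-- the reference splitter never returns [] on nonempty input
lemma split2_ne_nil (cs cur : List Char) (h : cs ≠ [] ∨ cur ≠ []) :
    pvSplit2 cs cur ≠ [] := by
  induction cs, cur using pvSplit2.induct with
  | case1 => rcases h with h | h <;> exact absurd rfl h
  | case2 cur hcur => rw [pvSplit2_nil, if_neg hcur]; simp
  | case3 cur rest ih => rw [pvSplit2_rn]; simp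
  | case4 cur c rest hne hb ih => rw [pvSplit2_step c rest cur hne, if_pos hb]; simp
  | case5 cur c rest hne hb ih =>
    rw [pvSplit2_step c rest cur hne, if_neg hb]
    exact ih (Or.inr (by simp))

-- head/tail of the reference splitter in terms of B's scan/consume
lemma split2_cons (cs cur : List Char) (hne : cs ≠ []) :
    pvSplit2 cs cur
      = (cur.reverse ++ (pvScan cs).1) :: pvSplit2 (pvConsume (pvScan cs).2) [] := by
  induction cs, cur using pvSplit2.induct with
  | case1 => exact absurd rfl hne
  | case2 cur hcur => exact absurd rfl hne
  | case3 cur rest ih =>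
    rw [pvSplit2_rn, pvScan]
    simp [pvConsume]
  | case4 cur c rest hne2 hb ih =>
    rw [pvSplit2_step c rest cur hne2, if_pos hb, pvScan, if_pos hb]
    simp [pvConsume_step c rest hne2]
  | case5 cur c rest hne2 hb ih =>
    have hb' : (c == '\n' || c == '\r') = false := by simpa using hb
    rw [pvSplit2_step c rest cur hne2, if_neg hb, pvScan, if_neg (by simp [hb'])]
    cases hr : rest with
    | nil =>
      subst hr
      rw [pvSplit2_nil, pvScan]
      simp [pvConsume, pvSplit2_nil]
    | cons d ds =>
      rw [← hr, ih (by simp [hr])]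
      simp

-- B's normalization equals the '\n'-join of the reference splitter, up to one
-- trailing '\n' when the input ends in a terminator
lemma norm_eq_join_split2 (cs cur : List Char) :
    cur.reverse ++ pvNorm cs
      = PySem.Chars.join ['\n'] (pvSplit2 cs cur)
        ++ (if pvEndsTerm cs then ['\n'] else []) := by
  induction cs, cur using pvSplit2.induct with
  | case1 =>
    rw [pvNorm, pvSplit2_nil, pvEndsTerm]
    simp [PySem.Chars.join, List.intercalate]
  | case2 cur hcur =>
    rw [pvNorm, pvSplit2_nil, if_neg hcur, pvEndsTerm]
    simp [PySem.Chars.join, List.intercalate]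
  | case3 cur rest ih =>
    rw [pvNorm_rn, pvSplit2_rn]
    cases hr : rest with
    | nil =>
      simp [pvSplit2_nil, pvNorm, PySem.Chars.join, List.intercalate,
            show pvEndsTerm ['\r', '\n'] = true from rfl]
    | cons d ds =>
      rw [← hr]
      have hrest : pvSplit2 rest [] ≠ [] := split2_ne_nil rest [] (Or.inl (by simp [hr]))
      obtain ⟨x, xs, hx⟩ := List.exists_cons_of_ne_nil hrest
      rw [hx, PySem.Chars.join_cons_cons]
      have het : pvEndsTerm ('\r' :: '\n' :: rest) = pvEndsTerm rest := by
        rw [hr, pvEndsTerm_cons, pvEndsTerm_cons]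
      rw [het]
      simp only [List.reverse_nil, List.nil_append, hx] at ih
      rw [show cur.reverse ++ '\n' :: pvNorm rest
            = cur.reverse ++ '\n' :: ([] ++ pvNorm rest) by simp, ih]
      simp
  | case4 cur c rest hne hb ih =>
    have hnorm : pvNorm (c :: rest) = '\n' :: pvNorm rest := by
      rw [pvNorm_step c rest hne]
      rcases (by simpa using hb : c = '\n' ∨ c = '\r') with h | h <;> subst h <;> rfl
    rw [hnorm, pvSplit2_step c rest cur hne, if_pos hb]
    cases hr : rest with
    | nil =>
      have het : pvEndsTerm [c] = true := hb
      simp [pvSplit2_nil, pvNorm, PySem.Chars.join, List.intercalate, het]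
    | cons d ds =>
      rw [← hr]
      have hrest : pvSplit2 rest [] ≠ [] := split2_ne_nil rest [] (Or.inl (by simp [hr]))
      obtain ⟨x, xs, hx⟩ := List.exists_cons_of_ne_nil hrest
      rw [hx, PySem.Chars.join_cons_cons]
      have het : pvEndsTerm (c :: rest) = pvEndsTerm rest := by
        rw [hr, pvEndsTerm_cons]
      rw [het]
      simp only [List.reverse_nil, List.nil_append, hx] at ih
      rw [show cur.reverse ++ '\n' :: pvNorm rest
            = cur.reverse ++ '\n' :: ([] ++ pvNorm rest) by simp, ih]
      simp
  | case5 cur c rest hne hb ih =>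
    have hb' : (c == '\n' || c == '\r') = false := by simpa using hb
    have hcr : (c == '\r') = false := by
      cases h : (c == '\r') with
      | false => rfl
      | true => rw [h] at hb'; simp at hb'
    have hnorm : pvNorm (c :: rest) = c :: pvNorm rest := by
      rw [pvNorm_step c rest hne, hcr]
      simp
    rw [hnorm, pvSplit2_step c rest cur hne, if_neg hb]
    have het : pvEndsTerm (c :: rest) = pvEndsTerm rest := by
      cases rest with
      | nil => rw [pvEndsTerm, pvEndsTerm]; exact hb'
      | cons d ds => rw [pvEndsTerm_cons]
    rw [het, ← ih]
    simp

-- strip absorbs the possible trailing '\n'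
lemma strip_norm_eq (cs : List Char) :
    PySem.Chars.strip (pvNorm cs) = PySem.Chars.strip (PySem.Chars.join ['\n'] (pvSplit2 cs [])) := by
  have := norm_eq_join_split2 cs []
  simp only [List.reverse_nil, List.nil_append] at this
  rw [this]
  by_cases h : pvEndsTerm cs = true
  · rw [if_pos h, strip_space_suffix _ ['\n'] (by intro c hc; simp at hc; subst hc; decide)]
  · rw [if_neg h]; simp

-- ===== VERDICT (by name: the statement is the Claim_ definition above) =====
theorem split_subject_body_py_spec : Claim_equal_split_subject_body_py := by
  intro email_text hdom
  unfold Spec_split_subject_body_py split_subject_body_py split_subject_body_py_alt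
  have hdom' : ∀ c ∈ email_text.toList, pvDomChar c = true := by
    have := hdom
    unfold Dom_split_subject_body_py pvDomStr at this
    simpa [List.all_eq_true] using this
  cases hcs : email_text.toList with
  | nil =>
    have : PySem.Str.splitlines email_text = [] := by
      unfold PySem.Str.splitlines
      rw [hcs]
      rfl
    rw [this]
  | cons c rest =>
    rw [hcs] at hdom'
    have hsl : PySem.Chars.splitlines (c :: rest) = pvSplit2 (c :: rest) [] :=
      splitlines_eq_split2 _ hdom'
    have hsplit := split2_cons (c :: rest) [] (by simp)
    simp only [List.reverse_nil, List.nil_append] at hsplit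
    have hstr : PySem.Str.splitlines email_text
        = String.ofList (pvScan (c :: rest)).1
          :: List.map String.ofList (pvSplit2 (pvConsume (pvScan (c :: rest)).2) []) := by
      unfold PySem.Str.splitlines
      rw [hcs, hsl, hsplit]
      rfl
    rw [hstr]
    dsimp only
    rw [strip_join_skip]
    apply Prod.ext
    · apply String.toList_inj.mp
      simp only [PySem.Str.toList_strip, String.toList_ofList]
    · apply String.toList_inj.mp
      simp only [PySem.Str.toList_strip, PySem.Str.toList_join, String.toList_ofList]
      rw [List.map_map]
      have hid : (String.toList ∘ String.ofList) = (id : List Char → List Char) := by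
        funext l; simp
      rw [hid, List.map_id]
      rw [show ("\n" : String).toList = ['\n'] from rfl]
      exact (strip_norm_eq (pvConsume (pvScan (c :: rest)).2)).symm
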